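-- pv_equiv track=rewrite | github.com/taylorgbir/Deep-Sea-Typist | DeepSea.py | highlight_word
-- ===== SOURCE A (Python) =====
-- def highlight_word(word, typed):
--     result = ""
--     for i, letter in enumerate(word):
--         if i < len(typed) and typed[i] == letter:
--             result += f"[{letter}]"
--         else:
--             result += letter
--     return result
-- ===== SOURCE B (Python) =====
-- def highlight_word(word, typed):
--     # Stage 1: collect the indices where the typed character matches the word.
--     matches = [i for i in range(min(len(word), len(typed))) if word[i] == typed[i]]
--     # Stage 2: assemble the result from slices of word between consecutive matches.
--     pieces = []
--     prev = 0
--     for i in matches: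
--         pieces.append(word[prev:i])
--         pieces.append("[" + word[i] + "]")
--         prev = i + 1
--     pieces.append(word[prev:])
--     return "".join(pieces)
-- ===== Notes on version B (the rewrite author's own statement) =====
-- stated objective: alternative
-- what changed: Instead of A's single enumerate loop that emits one character at a time under a bounds-and-match guard, B first computes the list of matching indices over range(min(len(word),len(typed))) and then assembles the result from whole slices of word between consecutive matches, joining the pieces at the end.
import Mathlib
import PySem

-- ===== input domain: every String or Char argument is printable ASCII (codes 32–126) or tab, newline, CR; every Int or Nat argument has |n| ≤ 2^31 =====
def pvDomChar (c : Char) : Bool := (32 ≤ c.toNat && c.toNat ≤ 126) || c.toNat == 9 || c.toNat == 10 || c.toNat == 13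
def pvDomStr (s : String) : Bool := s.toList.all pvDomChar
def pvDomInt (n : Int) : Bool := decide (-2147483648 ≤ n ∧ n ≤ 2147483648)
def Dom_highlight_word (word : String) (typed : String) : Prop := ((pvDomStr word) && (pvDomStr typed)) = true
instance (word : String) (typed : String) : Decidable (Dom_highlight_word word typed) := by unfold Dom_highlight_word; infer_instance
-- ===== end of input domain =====

-- B replaces A's per-character guarded loop by a two-stage algorithm: collect the matching
-- indices first, then assemble the result from slices of word between consecutive matches.

-- ===== PORT A =====
-- result = ""; for i, letter in enumerate(word): if i < len(typed) and typed[i] == letter: result += "[letter]" else result += letter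
def highlight_word (word : String) (typed : String) : String :=
  String.mk ((PySem.List.enumerate word.toList 0).foldl
    (fun acc p =>
      if p.1 < (typed.toList.length : Int) ∧ PySem.List.pyGetD typed.toList p.1 ' ' = p.2
      then acc ++ ['[', p.2, ']'] else acc ++ [p.2]) [])

-- ===== PORT B =====
-- matches = [i for i in range(min(len(word), len(typed))) if word[i] == typed[i]]
-- pieces = []; prev = 0
-- for i in matches: pieces.append(word[prev:i]); pieces.append("[" + word[i] + "]"); prev = i + 1
-- pieces.append(word[prev:]); return "".join(pieces)
-- (word[i] with 0 ≤ i < min of the lengths is exact as getD; slices use PySem.List.slice)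
def highlight_word_alt (word : String) (typed : String) : String :=
  let w := word.toList
  let t := typed.toList
  let ms := (List.range (min w.length t.length)).filter
      (fun (i : Nat) => PySem.List.pyGetD w (i : Int) ' ' == PySem.List.pyGetD t (i : Int) ' ')
  let r := ms.foldl
      (fun (st : List Char × Nat) (i : Nat) =>
        ((st.1 ++ PySem.List.slice w (some (st.2 : Int)) (some (i : Int))
              ++ ['[', PySem.List.pyGetD w (i : Int) ' ', ']'],
         i + 1) : List Char × Nat))
      ([], 0)
  String.mk (r.1 ++ PySem.List.slice w (some (r.2 : Int)) none)

-- ===== PRECONDITION & SPEC =====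
def Spec_highlight_word (word : String) (typed : String) (out : String) : Prop := out = highlight_word_alt word typed
instance (word : String) (typed : String) (out : String) : Decidable (Spec_highlight_word word typed out) := by unfold Spec_highlight_word; infer_instance

-- ===== CLAIM (what is proved, stated in full; the proofs are below) =====
def Claim_equal_highlight_word : Prop := ∀ (word : String) (typed : String), Dom_highlight_word word typed → Spec_highlight_word word typed (highlight_word word typed)

-- ===== LEMMAS AND PROOFS =====

-- A's loop from index s equals the canonical zip-plus-tail form computed against the suffix t.drop s.
theorem hw_key (t : List Char) : ∀ (w : List Char) (s : Nat) (acc : List Char),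
    (PySem.List.enumerate w (s : Int)).foldl
      (fun acc p =>
        if p.1 < (t.length : Int) ∧ PySem.List.pyGetD t p.1 ' ' = p.2
        then acc ++ ['[', p.2, ']'] else acc ++ [p.2]) acc
    = acc ++ ((w.zip (t.drop s)).flatMap
        (fun p => if p.2 = p.1 then ['[', p.1, ']'] else [p.1]))
      ++ w.drop (t.drop s).length := by
  intro w
  induction w with
  | nil => intro s acc; simp [PySem.List.enumerate]
  | cons c w ih =>
    intro s acc
    rw [PySem.List.enumerate_cons]
    by_cases hs : s < t.length
    · have hdrop : t.drop s = t[s] :: t.drop (s + 1) := by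
        rw [List.drop_eq_getElem_cons hs]
      have hlen : (c :: w).drop (t.drop s).length = w.drop (t.drop (s + 1)).length := by
        simp only [List.length_drop]
        rw [show t.length - s = (t.length - (s + 1)) + 1 by omega, List.drop_succ_cons]
      have hcond : ((s : Int) < (t.length : Int) ∧ PySem.List.pyGetD t (s : Int) ' ' = c)
          ↔ t[s] = c := by
        rw [PySem.List.pyGetD_natCast]
        constructor
        · rintro ⟨-, h⟩; rwa [List.getD_eq_getElem t ' ' hs] at h
        · intro h; exact ⟨by exact_mod_cast hs, by rwa [List.getD_eq_getElem t ' ' hs]⟩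
      simp only [List.foldl_cons, hdrop, List.zip_cons_cons, List.flatMap_cons]
      have hcast : ((s : Int) + 1) = ((s + 1 : Nat) : Int) := by push_cast; ring
      rw [hcast, ih (s + 1)]
      rw [← hdrop, hlen]
      by_cases hc : t[s] = c
      · rw [if_pos (hcond.mpr hc), if_pos hc]; simp
      · rw [if_neg (fun h => hc (hcond.mp h)), if_neg hc]; simp
    · have h1 : t.drop s = [] := List.drop_eq_nil_of_le (by omega)
      have h2 : t.drop (s + 1) = [] := List.drop_eq_nil_of_le (by omega)
      simp only [List.foldl_cons]
      rw [if_neg (fun hcon => hs (by exact_mod_cast hcon.1))]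
      have hcast : ((s : Int) + 1) = ((s + 1 : Nat) : Int) := by push_cast; ring
      rw [hcast, ih (s + 1)]
      simp [h1, h2]

-- B's staged loop over the remaining match indices (range' s n, s + n = min of the lengths),
-- starting with pending slice position prev, equals the same canonical zip-plus-tail form.
theorem hwB_key (w t : List Char) : ∀ (n s prev : Nat) (acc : List Char),
    prev ≤ s → s + n = min w.length t.length →
    (((List.range' s n).filter
        (fun i => w.getD i ' ' == t.getD i ' ')).foldl
        (fun (st : List Char × Nat) i =>
          (st.1 ++ (w.drop st.2).take (i - st.2) ++ ['[', w.getD i ' ', ']'], i + 1))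
        (acc, prev)).1
      ++ w.drop (((List.range' s n).filter
        (fun i => w.getD i ' ' == t.getD i ' ')).foldl
        (fun (st : List Char × Nat) i =>
          (st.1 ++ (w.drop st.2).take (i - st.2) ++ ['[', w.getD i ' ', ']'], i + 1))
        (acc, prev)).2
    = acc ++ (w.drop prev).take (s - prev)
        ++ ((w.drop s).zip (t.drop s)).flatMap
            (fun p => if p.2 = p.1 then ['[', p.1, ']'] else [p.1])
        ++ (w.drop s).drop (t.drop s).length := by
  intro n
  induction n with
  | zero =>
    intro s prev acc hps hm
    simp only [List.range', List.filter_nil, List.foldl_nil]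
    by_cases hw : w.length ≤ t.length
    · -- s = min = w.length: everything beyond is empty
      have hs : s = w.length := by omega
      have hwd : w.drop s = [] := by simp [hs]
      have htk : (w.drop prev).take (s - prev) = w.drop prev :=
        List.take_of_length_le (by simp only [List.length_drop]; omega)
      rw [htk, hwd]
      simp
    · -- s = min = t.length: the zip is empty and the tail is w.drop s
      have hs : s = t.length := by omega
      have htd : t.drop s = [] := by simp [hs]
      have hsw : s ≤ w.length := by omega
      have hsplit : (w.drop prev).take (s - prev) ++ w.drop s = w.drop prev := by
        have h : w.drop s = (w.drop prev).drop (s - prev) := by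
          rw [List.drop_drop]; congr 1; omega
        rw [h, List.take_append_drop]
      rw [htd]
      simp only [List.zip_nil_right, List.flatMap_nil, List.append_nil, List.length_nil,
        List.drop_zero]
      rw [List.append_assoc, hsplit]
  | succ n ih =>
    intro s prev acc hps hm
    have hsw : s < w.length := by omega
    have hst : s < t.length := by omega
    have hwd : w.drop s = w[s] :: w.drop (s + 1) := List.drop_eq_getElem_cons hsw
    have htd : t.drop s = t[s] :: t.drop (s + 1) := List.drop_eq_getElem_cons hst
    have hgw : w.getD s ' ' = w[s] := List.getD_eq_getElem w ' ' hsw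
    have hgt : t.getD s ' ' = t[s] := List.getD_eq_getElem t ' ' hst
    have htail' : List.drop (t[s] :: List.drop (s + 1) t).length (w[s] :: List.drop (s + 1) w)
        = List.drop (List.drop (s + 1) t).length (List.drop (s + 1) w) := by
      rw [List.length_cons, List.drop_succ_cons]
    rw [List.range'_succ]
    by_cases hc : w[s] = t[s]
    · -- matched index: emit the pending slice and the bracketed letter, reset prev to s+1
      rw [List.filter_cons_of_pos (by rw [hgw, hgt, hc]; exact beq_self_eq_true _)]
      simp only [List.foldl_cons]
      rw [ih (s + 1) (s + 1) _ (le_refl _) (by omega), hwd, htd, List.zip_cons_cons,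
        List.flatMap_cons, if_pos (show (w[s], t[s]).2 = (w[s], t[s]).1 from hc.symm),
        htail', hgw]
      simp only [Nat.sub_self, List.take_zero, List.append_nil, List.append_assoc,
        List.cons_append, List.nil_append]
    · -- unmatched index: it is skipped now and later covered by the pending slice
      have hc' : ¬ (w[s], t[s]).2 = (w[s], t[s]).1 := fun h => hc h.symm
      rw [List.filter_cons_of_neg (by rw [hgw, hgt]; simpa using hc)]
      have hidx : (w.drop prev)[s - prev]? = some w[s] := by
        rw [List.getElem?_drop, show prev + (s - prev) = s by omega]
        exact List.getElem?_eq_getElem hsw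
      have htk : (w.drop prev).take (s + 1 - prev)
          = (w.drop prev).take (s - prev) ++ [w[s]] := by
        rw [show s + 1 - prev = (s - prev) + 1 by omega, List.take_add_one, hidx]
        rfl
      rw [ih (s + 1) prev _ (by omega) (by omega), htk, hwd, htd, List.zip_cons_cons,
        List.flatMap_cons, if_neg hc', htail']
      simp only [List.append_assoc, List.cons_append, List.nil_append]

-- ===== VERDICT (by name: the statement is the Claim_ definition above) =====
theorem highlight_word_spec : Claim_equal_highlight_word := by
  intro word typed _
  unfold Spec_highlight_word highlight_word highlight_word_alt
  simp only [PySem.List.slice_natCast, PySem.List.slice_from_natCast,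
    PySem.List.pyGetD_natCast]
  rw [show ((0 : Int)) = ((0 : Nat) : Int) from rfl,
    hw_key typed.toList word.toList 0, List.range_eq_range',
    hwB_key word.toList typed.toList (min word.toList.length typed.toList.length) 0 0 []
      (le_refl 0) (by omega)]
  simp
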